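-- pv_equiv track=rewrite | github.com/LauraVrkmp/codecademy-computer-science | classes_books_and_persons.py | formatter
-- ===== SOURCE A (Python) =====
-- def formatter(list):
--   string = ''
--   for index in range(len(list)):
--     if index == 0:
--       string += str(list[index])
--     elif index == len(list) - 1:
--       string += ' and ' + str(list[index])
--     else:
--       string += ', ' + str(list[index])
--   return string
-- ===== SOURCE B (Python) =====
-- def formatter(list):
--   if not list:
--     return ''
--   if len(list) == 1:
--     return str(list[0])
--   return ', '.join(str(x) for x in list[:-1]) + ' and ' + str(list[-1])
-- ===== Notes on version B (the rewrite author's own statement) =====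
-- stated objective: idiomatic
-- what changed: Replaces the per-index loop with positional branches by a guard for empty/singleton lists plus a ', '.join of all-but-last and an appended ' and ' + last element.
import Mathlib
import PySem

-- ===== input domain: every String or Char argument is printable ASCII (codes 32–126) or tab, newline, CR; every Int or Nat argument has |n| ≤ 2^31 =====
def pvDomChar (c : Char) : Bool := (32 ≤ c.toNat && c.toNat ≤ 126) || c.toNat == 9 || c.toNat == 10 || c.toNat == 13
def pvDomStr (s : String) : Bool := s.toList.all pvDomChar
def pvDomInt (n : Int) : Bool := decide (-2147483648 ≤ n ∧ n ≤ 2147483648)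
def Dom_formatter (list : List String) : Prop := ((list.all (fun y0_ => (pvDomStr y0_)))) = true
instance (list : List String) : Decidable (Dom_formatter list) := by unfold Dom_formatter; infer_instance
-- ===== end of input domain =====

-- B guards the empty/singleton list and otherwise joins all-but-last with ', ' and appends ' and ' + last,
-- instead of A's index loop with per-position branches; same output, same asymptotic cost (objective: idiomatic).

-- ===== PORT A =====
-- for index in range(len(list)): branch on index == 0 / index == len(list)-1 / middle
def formatter (list : List String) : String :=
  (PySem.List.pyRange 0 (list.length : Int) 1).foldl
    (fun string index =>
      if index = 0 then string ++ PySem.List.pyGetD list index ""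
      else if index = (list.length : Int) - 1 then
        string ++ (" and " ++ PySem.List.pyGetD list index "")
      else string ++ (", " ++ PySem.List.pyGetD list index "")) ""

-- ===== PORT B =====
def formatter_alt (list : List String) : String :=
  if list = [] then ""
  else if list.length = 1 then PySem.List.pyGetD list 0 ""
  else
    PySem.Str.join ", " (PySem.List.slice list none (some (-1))) ++
      (" and " ++ PySem.List.pyGetD list (-1) "")

-- ===== PRECONDITION & SPEC =====
def Spec_formatter (list : List String) (out : String) : Prop := out = formatter_alt list
instance (list : List String) (out : String) : Decidable (Spec_formatter list out) := by unfold Spec_formatter; infer_instance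

-- ===== CLAIM (what is proved, stated in full; the proofs are below) =====
def Claim_equal_formatter : Prop := ∀ (list : List String), Dom_formatter list → Spec_formatter list (formatter list)

-- ===== LEMMAS AND PROOFS =====

-- the common shape of the tail (everything after the first element)
def fmTail : List String → String
  | [] => ""
  | [y] => " and " ++ y
  | y :: z :: r => ", " ++ y ++ fmTail (z :: r)

theorem join_comma_cons (x e : String) (l : List String) :
    PySem.Str.join ", " (x :: e :: l) = x ++ (", " ++ PySem.Str.join ", " (e :: l)) := by
  simp only [PySem.Str.join, List.map_cons,
    show (", " : String).toList = [',', ' '] from rfl,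
    PySem.Chars.join_cons_cons, List.append_assoc, String.ofList_append, String.ofList_toList]

-- A's loop over the tail: indices s, s+1, … with 1 ≤ s, n the total length
theorem formatter_tail (n : Int) :
    ∀ (rest : List String) (s : Int) (acc : String), 1 ≤ s → s + rest.length = n →
      (PySem.List.enumerate rest s).foldl
        (fun string p =>
          if p.1 = 0 then string ++ p.2
          else if p.1 = n - 1 then string ++ (" and " ++ p.2)
          else string ++ (", " ++ p.2)) acc = acc ++ fmTail rest := by
  intro rest
  induction rest with
  | nil => intro s acc _ _; simp [PySem.List.enumerate_nil, fmTail]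
  | cons y t ih =>
    intro s acc hs hn
    rw [PySem.List.enumerate_cons]
    cases t with
    | nil =>
      have hlast : s = n - 1 := by simp at hn; omega
      have h0 : s ≠ 0 := by omega
      have hne : n - 1 ≠ 0 := by omega
      simp only [PySem.List.enumerate_nil, List.foldl_cons, List.foldl_nil, fmTail, hlast,
        if_neg hne]
      simp
    | cons z r =>
      have h0 : s ≠ 0 := by omega
      have hmid : s ≠ n - 1 := by simp [List.length_cons] at hn; omega
      have hn' : s + 1 + ((z :: r).length : Int) = n := by
        simp [List.length_cons] at hn ⊢; omega
      simp only [List.foldl_cons, h0, hmid, if_false]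
      rw [ih (s + 1) _ (by omega) hn']
      simp [fmTail, String.append_assoc]

theorem formatter_eq_fmTail (x : String) (rest : List String) :
    formatter (x :: rest) = x ++ fmTail rest := by
  have hmap := PySem.List.enumerate_eq_map_pyRange (x :: rest) ""
  have key : formatter (x :: rest) =
      (PySem.List.enumerate (x :: rest) 0).foldl
        (fun string p =>
          if p.1 = 0 then string ++ p.2
          else if p.1 = ((x :: rest).length : Int) - 1 then string ++ (" and " ++ p.2)
          else string ++ (", " ++ p.2)) "" := by
    unfold formatter
    rw [hmap, List.foldl_map]
    rfl
  rw [key, PySem.List.enumerate_cons]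
  simp only [List.foldl_cons, if_true, String.empty_append, zero_add]
  rw [formatter_tail ((x :: rest).length : Int) rest 1 x le_rfl
    (by simp [List.length_cons]; omega)]

theorem formatter_alt_eq_fmTail (x : String) (rest : List String) :
    formatter_alt (x :: rest) = x ++ fmTail rest := by
  induction rest generalizing x with
  | nil => simp [formatter_alt, fmTail, PySem.List.pyGetD_zero_cons]
  | cons y t ih =>
    unfold formatter_alt
    cases t with
    | nil =>
      rw [if_neg (by simp), if_neg (by simp), PySem.List.slice_to_neg_one,
        PySem.List.pyGetD_neg_one [x, y] "" (by simp)]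
      simp [fmTail, PySem.Str.join, PySem.Chars.join, List.intercalate]
    | cons z r =>
      rw [if_neg (by simp), if_neg (by simp), PySem.List.slice_to_neg_one,
        PySem.List.pyGetD_neg_one (x :: y :: z :: r) "" (by simp)]
      have hb := ih y
      rw [formatter_alt, if_neg (by simp), if_neg (by simp), PySem.List.slice_to_neg_one,
        PySem.List.pyGetD_neg_one (y :: z :: r) "" (by simp)] at hb
      have hdrop : (x :: y :: z :: r).dropLast = x :: y :: (z :: r).dropLast := by
        simp [List.dropLast]
      have hdrop2 : (y :: z :: r).dropLast = y :: (z :: r).dropLast := by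
        simp [List.dropLast]
      rw [hdrop, join_comma_cons, List.getLast_cons (by simp), ← hdrop2,
        String.append_assoc (s₁ := x), String.append_assoc (s₁ := ", "), hb]
      simp [fmTail, String.append_assoc]

-- ===== VERDICT (by name: the statement is the Claim_ definition above) =====
theorem formatter_spec : Claim_equal_formatter := by
  intro list _
  unfold Spec_formatter
  cases list with
  | nil => decide
  | cons x rest => rw [formatter_eq_fmTail, formatter_alt_eq_fmTail]
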